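-- pv_equiv track=rewrite | github.com/YuHoChau/7-DOF-Tactile-Gripper | cross_attention_classification/multimodal_fusion.py | reorder_labels_for_display
-- ===== SOURCE A (Python) =====
-- def reorder_labels_for_display(label_names):
--     """Reorder labels: Can1-Can3 first, then alphabetical"""
--     can_labels = []
--     other_labels = []
--
--     for i, label in enumerate(label_names):
--         if label.startswith('Can') and len(label) > 3:
--             try:
--                 can_num = int(label[3:])
--                 can_labels.append((can_num, i, label))
--             except ValueError:
--                 other_labels.append((0, i, label))
--         else:
--             other_labels.append((0, i, label))
--
--     can_labels.sort()
--     other_labels.sort(key=lambda x: x[2])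
--
--     ordered_indices = [idx for _, idx, _ in can_labels + other_labels]
--     ordered_labels = [label for _, _, label in can_labels + other_labels]
--
--     return ordered_indices, ordered_labels
-- ===== SOURCE B (Python) =====
-- def reorder_labels_for_display(label_names):
--     """Reorder labels: Can1-Can3 first, then alphabetical"""
--     def can_num(label):
--         if label.startswith('Can') and len(label) > 3:
--             try:
--                 return int(label[3:])
--             except ValueError:
--                 return None
--         return None
--
--     # radix idiom: three stable sorts, least-significant key first
--     items = sorted(enumerate(label_names),
--                    key=lambda it: '' if can_num(it[1]) is not None else it[1])
--     items = sorted(items, key=lambda it: v if (v := can_num(it[1])) is not None else 0)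
--     items = sorted(items, key=lambda it: 0 if can_num(it[1]) is not None else 1)
--     return [i for i, _ in items], [label for _, label in items]
-- ===== Notes on version B (the rewrite author's own statement) =====
-- stated objective: alternative
-- what changed: Replaces A's partition into two lists with two differently-keyed sorts and a concatenation by the classic radix idiom: one enumerated list stably sorted three times with scalar keys (secondary string key, then can-number, then group), least-significant key first.
import Mathlib
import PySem

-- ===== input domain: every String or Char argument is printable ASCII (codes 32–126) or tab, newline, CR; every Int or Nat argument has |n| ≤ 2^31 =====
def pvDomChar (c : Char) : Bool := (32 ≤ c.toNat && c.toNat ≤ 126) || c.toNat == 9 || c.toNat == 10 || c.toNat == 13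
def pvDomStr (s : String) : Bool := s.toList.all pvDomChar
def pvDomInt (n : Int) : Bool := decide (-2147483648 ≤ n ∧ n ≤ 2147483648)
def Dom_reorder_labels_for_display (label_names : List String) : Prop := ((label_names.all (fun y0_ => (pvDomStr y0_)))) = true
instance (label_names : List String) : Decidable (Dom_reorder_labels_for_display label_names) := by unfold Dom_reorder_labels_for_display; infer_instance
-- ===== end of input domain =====

-- B replaces A's partition-into-two-lists + two separately-keyed sorts + concatenation by the
-- classic radix idiom: three stable sorts of one enumerated list, least-significant key first.

-- ===== PORT A =====
def reorder_labels_for_display (label_names : List String) : List Int × List String :=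
  let st := (PySem.List.enumerate label_names).foldl
    (fun (st : List (Int × Int × String) × List (Int × Int × String)) p =>
      if PySem.Str.startswith p.2 "Can" && decide (3 < PySem.Str.len p.2) then
        match PySem.Int.ofStr? (PySem.Str.slice p.2 (some 3) none) with
        | some can_num => (st.1 ++ [(can_num, p.1, p.2)], st.2)
        | none => (st.1, st.2 ++ [(0, p.1, p.2)])
      else (st.1, st.2 ++ [(0, p.1, p.2)])) ([], [])
  -- can_labels.sort(): a lexicographic tuple sort on (can_num, i, label); the middle component i
  -- (the enumerate index) is distinct within the list, so the third component never decides a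
  -- comparison — ported exactly as the two-key sort by (can_num, i).
  let can_labels := PySem.List.sorted2 st.1 (fun t => t.1) (fun t => t.2.1)
  let other_labels := PySem.List.sorted st.2 (fun t => t.2.2)
  ((can_labels ++ other_labels).map (fun t => t.2.1),
   (can_labels ++ other_labels).map (fun t => t.2.2))

-- ===== PORT B =====
-- helper can_num(label) of Source B: some n when the label is 'Can<int>', none otherwise
def pvCanNum? (label : String) : Option Int :=
  if PySem.Str.startswith label "Can" && decide (3 < PySem.Str.len label) then
    PySem.Int.ofStr? (PySem.Str.slice label (some 3) none)
  else none

-- the three sort keys of Source B's lambdas, named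
def pvKeyStr (it : Int × String) : String := if (pvCanNum? it.2).isSome then "" else it.2
def pvKeyNum (it : Int × String) : Int := (pvCanNum? it.2).getD 0
def pvKeyGrp (it : Int × String) : Int := if (pvCanNum? it.2).isSome then 0 else 1

def reorder_labels_for_display_alt (label_names : List String) : List Int × List String :=
  let items1 := PySem.List.sorted (PySem.List.enumerate label_names) pvKeyStr
  let items2 := PySem.List.sorted items1 pvKeyNum
  let items3 := PySem.List.sorted items2 pvKeyGrp
  (items3.map (fun p => p.1), items3.map (fun p => p.2))

-- ===== PRECONDITION & SPEC =====
def Spec_reorder_labels_for_display (label_names : List String) (out : List Int × List String) : Prop := out = reorder_labels_for_display_alt label_names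
instance (label_names : List String) (out : List Int × List String) : Decidable (Spec_reorder_labels_for_display label_names out) := by unfold Spec_reorder_labels_for_display; infer_instance

-- ===== CLAIM (what is proved, stated in full; the proofs are below) =====
def Claim_equal_reorder_labels_for_display : Prop := ∀ (label_names : List String), Dom_reorder_labels_for_display label_names → Spec_reorder_labels_for_display label_names (reorder_labels_for_display label_names)

-- ===== LEMMAS AND PROOFS =====

-- the stability orders left by the three passes of B
def pvQS (a b : Int × String) : Prop := pvKeyStr a < pvKeyStr b ∨ (pvKeyStr a = pvKeyStr b ∧ a.1 < b.1)
def pvQN (a b : Int × String) : Prop := pvKeyNum a < pvKeyNum b ∨ (pvKeyNum a = pvKeyNum b ∧ pvQS a b)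
def pvQG (a b : Int × String) : Prop := pvKeyGrp a < pvKeyGrp b ∨ (pvKeyGrp a = pvKeyGrp b ∧ pvQN a b)

-- the two halves A builds, as filterMaps of the enumerated list
def pvFC (p : Int × String) : Option (Int × Int × String) :=
  if (pvCanNum? p.2).isSome then some ((pvCanNum? p.2).getD 0, p.1, p.2) else none
def pvFO (p : Int × String) : Option (Int × Int × String) :=
  if (pvCanNum? p.2).isSome then none else some (0, p.1, p.2)

lemma pv_insertBy_pairwise {α : Type} (before : α → α → Bool) (Q : α → α → Prop)
    (htrans : ∀ x y z, before x y = true → Q y z → Q x z)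
    (x : α) (acc : List α) (hacc : acc.Pairwise Q)
    (hx : ∀ y ∈ acc, before x y = true → Q x y)
    (hy : ∀ y ∈ acc, before x y = false → Q y x) :
    (PySem.List.insertBy before x acc).Pairwise Q := by
  induction acc with
  | nil => simp [PySem.List.insertBy]
  | cons y t ih =>
    have heq : PySem.List.insertBy before x (y::t)
        = if before x y then x::y::t else y :: PySem.List.insertBy before x t := rfl
    rw [heq]
    rcases List.pairwise_cons.mp hacc with ⟨hyt, ht⟩
    cases hb : before x y with
    | true =>
      simp only [hb, if_true]
      refine List.pairwise_cons.mpr ⟨?_, hacc⟩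
      intro w hw
      rcases List.mem_cons.mp hw with rfl | hwt
      · exact hx w (by simp) hb
      · exact htrans x y w hb (hyt w hwt)
    | false =>
      simp only [hb, Bool.false_eq_true, if_false]
      refine List.pairwise_cons.mpr ⟨?_, ?_⟩
      · intro w hw
        rcases (PySem.List.mem_insertBy before x w t).mp hw with rfl | hwt
        · exact hy y (by simp) hb
        · exact hyt w hwt
      · exact ih ht (fun y' h hb' => hx y' (by simp [h]) hb')
          (fun y' h hb' => hy y' (by simp [h]) hb')

lemma pv_foldl_insertBy_pairwise {α : Type} (before : α → α → Bool) (Q R : α → α → Prop)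
    (htrans : ∀ x y z, before x y = true → Q y z → Q x z)
    (hxy : ∀ x y, before x y = true → Q x y)
    (hyx : ∀ x y, R y x → before x y = false → Q y x)
    (xs : List α) (acc : List α) (hacc : acc.Pairwise Q)
    (hcross : ∀ y ∈ acc, ∀ x ∈ xs, R y x) (hxs : xs.Pairwise R) :
    (xs.foldl (fun acc x => PySem.List.insertBy before x acc) acc).Pairwise Q := by
  induction xs generalizing acc with
  | nil => simpa using hacc
  | cons x xs ih =>
    rcases List.pairwise_cons.mp hxs with ⟨hxxs, hxs'⟩
    simp only [List.foldl_cons]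
    refine ih _ ?_ ?_ hxs'
    · exact pv_insertBy_pairwise before Q htrans x acc hacc
        (fun y _ hb => hxy x y hb)
        (fun y hmem hb => hyx x y (hcross y hmem x (by simp)) hb)
    · intro y hmem x' hx'
      rcases (PySem.List.mem_insertBy before x y acc).mp hmem with rfl | hyacc
      · exact hxxs x' hx'
      · exact hcross y hyacc x' (by simp [hx'])

lemma pv_sorted_pairwise_stable {α κ : Type} [LinearOrder κ] (key : α → κ) (R : α → α → Prop)
    (xs : List α) (hxs : xs.Pairwise R) :
    (PySem.List.sorted xs key).Pairwise (fun a b => key a < key b ∨ (key a = key b ∧ R a b)) := by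
  rw [PySem.List.sorted_eq_foldl_insertBy]
  refine pv_foldl_insertBy_pairwise _ _ R ?_ ?_ ?_ xs [] (by simp) (by simp) hxs
  · intro x y z hb hQ
    have hxy : key x < key y := by simpa using hb
    rcases hQ with h | ⟨h, _⟩
    · exact Or.inl (hxy.trans h)
    · exact Or.inl (h ▸ hxy)
  · intro x y hb; exact Or.inl (by simpa using hb)
  · intro x y hR hb
    have h : ¬ key x < key y := by simpa using hb
    rcases lt_or_eq_of_le (le_of_not_gt h) with h' | h'
    · exact Or.inl h'
    · exact Or.inr ⟨h', hR⟩

-- the comparator of sorted2 in arithmetic form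
lemma pv_sorted2_before_true {α : Type} (k1 k2 : α → Int) (x y : α)
    (hb : (decide (k1 x < k1 y) || (!decide (k1 y < k1 x) && decide (k2 x < k2 y))) = true) :
    k1 x ≤ k1 y ∧ (k1 x < k1 y ∨ k2 x < k2 y) := by
  simp only [Bool.or_eq_true, Bool.and_eq_true, Bool.not_eq_true', decide_eq_true_eq,
    decide_eq_false_iff_not] at hb
  rcases hb with h | ⟨h1, h2⟩
  · exact ⟨le_of_lt h, Or.inl h⟩
  · exact ⟨by omega, Or.inr h2⟩

lemma pv_sorted2_before_false {α : Type} (k1 k2 : α → Int) (x y : α)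
    (hb : (decide (k1 x < k1 y) || (!decide (k1 y < k1 x) && decide (k2 x < k2 y))) = false) :
    ¬ k1 x < k1 y ∧ (k1 y < k1 x ∨ ¬ k2 x < k2 y) := by
  have hb' : ¬ (decide (k1 x < k1 y) || (!decide (k1 y < k1 x) && decide (k2 x < k2 y))) = true := by
    simp [hb]
  simp only [Bool.or_eq_true, Bool.and_eq_true, Bool.not_eq_true', decide_eq_true_eq,
    decide_eq_false_iff_not, not_or, not_and] at hb'
  refine ⟨hb'.1, ?_⟩
  by_cases h : k1 y < k1 x
  · exact Or.inl h
  · exact Or.inr (hb'.2 h)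

lemma pv_sorted2_pairwise_stable {α : Type} (k1 k2 : α → Int) (R : α → α → Prop)
    (xs : List α) (hxs : xs.Pairwise R) :
    (PySem.List.sorted2 xs k1 k2).Pairwise
      (fun a b => (k1 a < k1 b ∨ (k1 a = k1 b ∧ k2 a < k2 b))
        ∨ (k1 a = k1 b ∧ k2 a = k2 b ∧ R a b)) := by
  show (xs.foldl (fun acc x => PySem.List.insertBy
      (fun a b => decide (k1 a < k1 b) || (!decide (k1 b < k1 a) && decide (k2 a < k2 b))) x acc) []).Pairwise _
  refine pv_foldl_insertBy_pairwise _ _ R ?_ ?_ ?_ xs [] (by simp) (by simp) hxs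
  · intro x y z hb hQ
    obtain ⟨hle, hor⟩ := pv_sorted2_before_true k1 k2 x y hb
    have hQ' : k1 y ≤ k1 z ∧ (k1 y < k1 z ∨ k2 y ≤ k2 z) := by
      rcases hQ with (h | ⟨h1, h2⟩) | ⟨h1, h2, _⟩
      · exact ⟨le_of_lt h, Or.inl h⟩
      · exact ⟨le_of_eq h1, Or.inr (le_of_lt h2)⟩
      · exact ⟨le_of_eq h1, Or.inr (le_of_eq h2)⟩
    rcases lt_or_eq_of_le (hle.trans hQ'.1) with hlt | heq
    · exact Or.inl (Or.inl hlt)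
    · have e1 : k1 x = k1 y := by omega
      have e2 : k1 y = k1 z := by omega
      have h2x : k2 x < k2 y := by rcases hor with h | h <;> omega
      have h2y : k2 y ≤ k2 z := by rcases hQ'.2 with h | h <;> omega
      exact Or.inl (Or.inr ⟨heq, lt_of_lt_of_le h2x h2y⟩)
  · intro x y hb
    obtain ⟨hle, hor⟩ := pv_sorted2_before_true k1 k2 x y hb
    rcases lt_or_eq_of_le hle with hlt | heq
    · exact Or.inl (Or.inl hlt)
    · have h2 : k2 x < k2 y := by rcases hor with h | h <;> omega
      exact Or.inl (Or.inr ⟨heq, h2⟩)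
  · intro x y hR hb
    obtain ⟨h1, hor⟩ := pv_sorted2_before_false k1 k2 x y hb
    by_cases hlt : k1 y < k1 x
    · exact Or.inl (Or.inl hlt)
    · have e : k1 y = k1 x := by omega
      have hk2 : ¬ k2 x < k2 y := by rcases hor with h | h <;> omega
      by_cases h2 : k2 y < k2 x
      · exact Or.inl (Or.inr ⟨e, h2⟩)
      · exact Or.inr ⟨e, by omega, hR⟩

-- pvFC / pvFO inversion
lemma pv_fC_some {p : Int × String} {t : Int × Int × String} (h : pvFC p = some t) :
    t = ((pvCanNum? p.2).getD 0, p.1, p.2) ∧ (pvCanNum? p.2).isSome = true := by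
  unfold pvFC at h
  by_cases hc : (pvCanNum? p.2).isSome
  · rw [if_pos hc] at h; exact ⟨(Option.some_inj.mp h).symm, hc⟩
  · rw [if_neg hc] at h; cases h

lemma pv_fO_some {p : Int × String} {t : Int × Int × String} (h : pvFO p = some t) :
    t = (0, p.1, p.2) ∧ (pvCanNum? p.2).isSome = false := by
  unfold pvFO at h
  by_cases hc : (pvCanNum? p.2).isSome
  · rw [if_pos hc] at h; cases h
  · rw [if_neg hc] at h
    exact ⟨(Option.some_inj.mp h).symm, by simp at hc; simp [hc]⟩

-- characterization of A's partition loop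
lemma pv_fold_char (ys : List (Int × String))
    (acc : List (Int × Int × String) × List (Int × Int × String)) :
    ys.foldl
      (fun (st : List (Int × Int × String) × List (Int × Int × String)) p =>
        if PySem.Str.startswith p.2 "Can" && decide (3 < PySem.Str.len p.2) then
          match PySem.Int.ofStr? (PySem.Str.slice p.2 (some 3) none) with
          | some can_num => (st.1 ++ [(can_num, p.1, p.2)], st.2)
          | none => (st.1, st.2 ++ [(0, p.1, p.2)])
        else (st.1, st.2 ++ [(0, p.1, p.2)])) acc
    = (acc.1 ++ ys.filterMap pvFC, acc.2 ++ ys.filterMap pvFO) := by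
  induction ys generalizing acc with
  | nil => simp
  | cons p ys ih =>
    simp only [List.foldl_cons, List.filterMap_cons]
    by_cases h1 : (PySem.Str.startswith p.2 "Can" && decide (3 < PySem.Str.len p.2)) = true
    · cases h2 : PySem.Int.ofStr? (PySem.Str.slice p.2 (some 3) none) with
      | some n =>
        have hC : pvCanNum? p.2 = some n := by unfold pvCanNum?; rw [if_pos h1, h2]
        have hfc : pvFC p = some (n, p.1, p.2) := by simp [pvFC, hC]
        have hfo : pvFO p = none := by simp [pvFO, hC]
        simp only [h1, if_true, h2, hfc, hfo]
        rw [ih]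
        simp
      | none =>
        have hC : pvCanNum? p.2 = none := by unfold pvCanNum?; rw [if_pos h1, h2]
        have hfc : pvFC p = none := by simp [pvFC, hC]
        have hfo : pvFO p = some (0, p.1, p.2) := by simp [pvFO, hC]
        simp only [h1, if_true, h2, hfc, hfo]
        rw [ih]
        simp
    · have h1' : (PySem.Str.startswith p.2 "Can" && decide (3 < PySem.Str.len p.2)) = false := by
        simpa using h1
      have hcond : ¬ ((PySem.Str.startswith p.2 "Can" && decide (3 < PySem.Str.len p.2)) = true) := by
        rw [h1']; simp
      have hC : pvCanNum? p.2 = none := by unfold pvCanNum?; rw [if_neg hcond]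
      have hfc : pvFC p = none := by simp [pvFC, hC]
      have hfo : pvFO p = some (0, p.1, p.2) := by simp [pvFO, hC]
      simp only [h1', Bool.false_eq_true, if_false, hfc, hfo]
      rw [ih]
      simp

lemma pv_map_fC (ys : List (Int × String)) :
    (ys.filterMap pvFC).map (fun t => (t.2.1, t.2.2)) = ys.filter (fun p => (pvCanNum? p.2).isSome) := by
  induction ys with
  | nil => rfl
  | cons p ys ih =>
    by_cases h : (pvCanNum? p.2).isSome
    · have hfc : pvFC p = some ((pvCanNum? p.2).getD 0, p.1, p.2) := by simp [pvFC, h]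
      simp [List.filterMap_cons, List.filter_cons, hfc, h, ih]
    · have hfc : pvFC p = none := by simp [pvFC, h]
      simp [List.filterMap_cons, List.filter_cons, hfc, h, ih]

lemma pv_map_fO (ys : List (Int × String)) :
    (ys.filterMap pvFO).map (fun t => (t.2.1, t.2.2)) = ys.filter (fun p => !(pvCanNum? p.2).isSome) := by
  induction ys with
  | nil => rfl
  | cons p ys ih =>
    by_cases h : (pvCanNum? p.2).isSome
    · have hfo : pvFO p = none := by simp [pvFO, h]
      have hne : pvCanNum? p.2 ≠ none := Option.isSome_iff_ne_none.mp h
      simp [List.filterMap_cons, List.filter_cons, hfo, h, ih, hne]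
    · have hfo : pvFO p = some (0, p.1, p.2) := by simp [pvFO, h]
      have heq : pvCanNum? p.2 = none := Option.not_isSome_iff_eq_none.mp h
      simp [List.filterMap_cons, List.filter_cons, hfo, h, ih, heq]

lemma pv_enum_pairwise (label_names : List String) :
    (PySem.List.enumerate label_names).Pairwise (fun a b => a.1 < b.1) := by
  have h := PySem.List.pairwise_lt_pyRange_one 0 (0 + (label_names.length : Int))
  rw [← PySem.List.map_fst_enumerate label_names 0] at h
  exact List.pairwise_map.mp h

-- antisymmetry of the combined order
lemma pv_QG_antisymm (a b : Int × String) (h1 : pvQG a b) (h2 : pvQG b a) : a = b := by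
  exfalso
  rcases h1 with h1 | ⟨e1, h1⟩ <;> rcases h2 with h2 | ⟨e2, h2⟩
  · omega
  · omega
  · omega
  · rcases h1 with h1 | ⟨f1, h1⟩ <;> rcases h2 with h2 | ⟨f2, h2⟩
    · omega
    · omega
    · omega
    · rcases h1 with h1 | ⟨g1, h1⟩ <;> rcases h2 with h2 | ⟨g2, h2⟩
      · exact absurd h2 (lt_asymm h1)
      · rw [g2] at h1; exact lt_irrefl _ h1
      · rw [g1] at h2; exact lt_irrefl _ h2
      · omega

-- A's result list equals B's result list
lemma pv_main (label_names : List String) :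
    reorder_labels_for_display label_names = reorder_labels_for_display_alt label_names := by
  unfold reorder_labels_for_display reorder_labels_for_display_alt
  rw [pv_fold_char]
  simp only [List.nil_append]
  set ys := PySem.List.enumerate label_names with hys
  set can := List.filterMap pvFC ys with hcan
  set oth := List.filterMap pvFO ys with hoth
  set cs := PySem.List.sorted2 can (fun t => t.1) (fun t => t.2.1) with hcs
  set os := PySem.List.sorted oth (fun t => t.2.2) with hos
  set zs := PySem.List.sorted (PySem.List.sorted (PySem.List.sorted ys pvKeyStr) pvKeyNum) pvKeyGrp with hzs
  set L := cs.map (fun t => (t.2.1, t.2.2)) ++ os.map (fun t => (t.2.1, t.2.2)) with hL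
  suffices h : zs = L by
    rw [h, hL]
    simp only [List.map_append, List.map_map]
    rfl
  have hysP : ys.Pairwise (fun a b => a.1 < b.1) := pv_enum_pairwise label_names
  have hcanP : can.Pairwise (fun a b => a.2.1 < b.2.1) := by
    refine List.pairwise_filterMap.mpr (hysP.imp ?_)
    intro a b hab t ht t' ht'
    obtain ⟨rfl, -⟩ := pv_fC_some ht
    obtain ⟨rfl, -⟩ := pv_fC_some ht'
    simpa using hab
  have hothP : oth.Pairwise (fun a b => a.2.1 < b.2.1) := by
    refine List.pairwise_filterMap.mpr (hysP.imp ?_)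
    intro a b hab t ht t' ht'
    obtain ⟨rfl, -⟩ := pv_fO_some ht
    obtain ⟨rfl, -⟩ := pv_fO_some ht'
    simpa using hab
  have csQ : cs.Pairwise (fun a b => a.1 < b.1 ∨ (a.1 = b.1 ∧ a.2.1 < b.2.1)) := by
    refine (pv_sorted2_pairwise_stable (fun t => t.1) (fun t => t.2.1) _ can hcanP).imp ?_
    rintro a b ((h | h) | ⟨h1, h2, h3⟩)
    · exact Or.inl h
    · exact Or.inr h
    · exact Or.inr ⟨h1, h3⟩
  have osQ : os.Pairwise (fun a b => a.2.2 < b.2.2 ∨ (a.2.2 = b.2.2 ∧ a.2.1 < b.2.1)) :=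
    pv_sorted_pairwise_stable (fun t => t.2.2) _ oth hothP
  have zsQ : zs.Pairwise pvQG :=
    pv_sorted_pairwise_stable pvKeyGrp pvQN _
      (pv_sorted_pairwise_stable pvKeyNum pvQS _
        (pv_sorted_pairwise_stable pvKeyStr (fun a b => a.1 < b.1) ys hysP))
  have zsPerm : zs.Perm ys :=
    (PySem.List.sorted_perm _ _ _).trans
      ((PySem.List.sorted_perm _ _ _).trans (PySem.List.sorted_perm _ _ _))
  have LPerm : L.Perm ys := by
    have h1 : (cs.map (fun t => (t.2.1, t.2.2))).Perm (can.map (fun t => (t.2.1, t.2.2))) :=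
      (PySem.List.sorted2_perm _ _ _ _).map _
    have h2 : (os.map (fun t => (t.2.1, t.2.2))).Perm (oth.map (fun t => (t.2.1, t.2.2))) :=
      (PySem.List.sorted_perm _ _ _).map _
    refine (h1.append h2).trans ?_
    rw [hcan, hoth, pv_map_fC, pv_map_fO]
    exact List.filter_append_perm _ ys
  have hmemC : ∀ t ∈ cs, (pvCanNum? t.2.2).isSome = true ∧ t.1 = (pvCanNum? t.2.2).getD 0 := by
    intro t ht
    have htc : t ∈ can := (PySem.List.sorted2_perm _ _ _ _).subset ht
    rcases List.mem_filterMap.mp htc with ⟨p, -, hp⟩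
    obtain ⟨rfl, hc⟩ := pv_fC_some hp
    exact ⟨hc, rfl⟩
  have hmemO : ∀ t ∈ os, (pvCanNum? t.2.2).isSome = false := by
    intro t ht
    have htc : t ∈ oth := (PySem.List.sorted_perm _ _ _).subset ht
    rcases List.mem_filterMap.mp htc with ⟨p, -, hp⟩
    obtain ⟨rfl, hc⟩ := pv_fO_some hp
    exact hc
  have LQ : L.Pairwise pvQG := by
    rw [hL, List.pairwise_append]
    refine ⟨?_, ?_, ?_⟩
    · rw [List.pairwise_map]
      refine csQ.imp_of_mem ?_
      intro a b ha hb hab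
      obtain ⟨ca, na⟩ := hmemC a ha
      obtain ⟨cb, nb⟩ := hmemC b hb
      unfold pvQG pvQN pvQS pvKeyGrp pvKeyNum pvKeyStr
      simp only [ca, cb, if_true]
      rw [← na, ← nb]
      rcases hab with h | ⟨h1, h2⟩
      · exact Or.inr ⟨trivial, Or.inl h⟩
      · exact Or.inr ⟨trivial, Or.inr ⟨h1, Or.inr ⟨trivial, h2⟩⟩⟩
    · rw [List.pairwise_map]
      refine osQ.imp_of_mem ?_
      intro a b ha hb hab
      have ea : pvCanNum? a.2.2 = none := by
        have := hmemO a ha; simpa [Option.not_isSome_iff_eq_none] using this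
      have eb : pvCanNum? b.2.2 = none := by
        have := hmemO b hb; simpa [Option.not_isSome_iff_eq_none] using this
      unfold pvQG pvQN pvQS pvKeyGrp pvKeyNum pvKeyStr
      simp only [ea, eb, Option.isSome_none, Bool.false_eq_true, if_false, Option.getD_none]
      exact Or.inr ⟨trivial, Or.inr ⟨trivial, hab⟩⟩
    · intro a ha b hb
      rcases List.mem_map.mp ha with ⟨t, ht, rfl⟩
      rcases List.mem_map.mp hb with ⟨u, hu, rfl⟩
      have ca := (hmemC t ht).1
      have cb := hmemO u hu
      unfold pvQG pvKeyGrp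
      simp only [ca, cb, Bool.false_eq_true, if_true, if_false]
      exact Or.inl (by norm_num)
  exact List.eq_of_perm_of_sorted (fun a b _ _ h1 h2 => pv_QG_antisymm a b h1 h2) zsQ LQ
    (zsPerm.trans LPerm.symm)

-- ===== VERDICT (by name: the statement is the Claim_ definition above) =====
theorem reorder_labels_for_display_spec : Claim_equal_reorder_labels_for_display := by
  intro label_names _
  exact pv_main label_names
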